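-- pv_equiv track=rewrite | github.com/mmc00/equilibria | src/equilibria/babel/gdx/reader.py | _build_index_tuple_with_offsets
-- ===== SOURCE A (Python) =====
-- def _build_index_tuple_with_offsets(
--     rel_indices: list[int],
--     elements: list[str],
--     dimension: int,
--     domain_offsets: list[int],
-- ) -> tuple[str, ...]:
--     """
--     Build an index tuple from relative indices using domain offsets.
--
--     Args:
--         rel_indices: List of relative indices within each domain.
--         elements: UEL elements list.
--         dimension: Expected dimension.
--         domain_offsets: Offset in UEL for each dimension.
--
--     Returns:
--         Tuple of element names, or empty tuple if invalid.
--     """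
--     if dimension == 0:
--         return ()
--
--     result: list[str] = []
--     for i in range(min(dimension, len(rel_indices))):
--         # Apply domain offset to get absolute UEL index
--         offset: int = domain_offsets[i] if i < len(domain_offsets) else 0
--         abs_idx: int = rel_indices[i] + offset
--
--         if 0 <= abs_idx < len(elements):
--             result.append(elements[abs_idx])
--         else:
--             # Invalid index
--             return ()
--
--     return tuple(result)
-- ===== SOURCE B (Python) =====
-- def _build_index_tuple_with_offsets(
--     rel_indices: list[int],
--     elements: list[str],
--     dimension: int,
--     domain_offsets: list[int],
-- ) -> tuple[str, ...]:
--     """Divide-and-conquer variant: recursively solve halves of the position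
--     range [lo, hi); an out-of-range index yields None, which propagates up."""
--     def solve(lo: int, hi: int):
--         if hi <= lo:
--             return []
--         if hi == lo + 1:
--             a = rel_indices[lo] + (domain_offsets[lo] if lo < len(domain_offsets) else 0)
--             return [elements[a]] if 0 <= a < len(elements) else None
--         mid = (lo + hi) // 2
--         left = solve(lo, mid)
--         if left is None:
--             return None
--         right = solve(mid, hi)
--         if right is None:
--             return None
--         return left + right
--
--     n = min(dimension, len(rel_indices))
--     out = solve(0, n if n > 0 else 0)
--     return () if out is None else tuple(out)
-- ===== Notes on version B (the rewrite author's own statement) =====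
-- stated objective: alternative
-- what changed: Replaces A's linear loop with early return by a divide-and-conquer recursion on the position range [lo, hi): each half is solved independently, an out-of-range index yields None which propagates up, and the halves are concatenated; dimension<=0 falls out as the empty range.
import Mathlib
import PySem

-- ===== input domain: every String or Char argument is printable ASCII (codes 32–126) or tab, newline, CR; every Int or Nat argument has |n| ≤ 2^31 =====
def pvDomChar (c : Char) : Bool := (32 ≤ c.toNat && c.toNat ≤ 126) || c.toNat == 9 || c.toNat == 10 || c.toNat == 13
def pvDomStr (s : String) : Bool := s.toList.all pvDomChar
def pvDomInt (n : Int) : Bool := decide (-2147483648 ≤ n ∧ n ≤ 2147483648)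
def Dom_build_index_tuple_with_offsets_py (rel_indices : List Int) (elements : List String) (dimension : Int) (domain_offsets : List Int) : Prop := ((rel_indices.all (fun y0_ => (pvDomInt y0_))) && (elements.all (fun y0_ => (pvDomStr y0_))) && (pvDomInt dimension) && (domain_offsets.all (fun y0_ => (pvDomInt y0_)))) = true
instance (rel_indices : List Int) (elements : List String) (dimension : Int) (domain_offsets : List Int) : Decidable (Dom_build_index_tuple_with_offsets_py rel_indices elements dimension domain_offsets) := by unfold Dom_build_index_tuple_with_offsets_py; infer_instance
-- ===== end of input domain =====

-- B replaces A's linear early-exit loop by a divide-and-conquer over the position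
-- range [lo, hi): solve each half, an invalid index propagates as none. Alternative
-- decomposition, same result.

-- ===== PORT A =====
-- the `for i in range(...)` loop of A: appends on valid index, returns () (= []) otherwise
def bitwo_loopA (rel : List Int) (elems : List String) (offs : List Int)
    (idxs : List Int) (acc : List String) : List String :=
  match idxs with
  | [] => acc
  | i :: rest =>
    let offset : Int := if i < (offs.length : Int) then (PySem.List.pyGet? offs i).getD 0 else 0
    let absIdx : Int := (PySem.List.pyGet? rel i).getD 0 + offset
    if 0 ≤ absIdx ∧ absIdx < (elems.length : Int) then
      bitwo_loopA rel elems offs rest (acc ++ [(PySem.List.pyGet? elems absIdx).getD ""])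
    else []

def build_index_tuple_with_offsets_py (rel_indices : List Int) (elements : List String) (dimension : Int) (domain_offsets : List Int) : List String :=
  if dimension = 0 then []
  else bitwo_loopA rel_indices elements domain_offsets
         (PySem.List.pyRange 0 (min dimension (rel_indices.length : Int)) 1) []

-- ===== PORT B =====
-- the inner `solve(lo, hi)` of Source B: divide and conquer on the position range
def bitwo_solve (rel : List Int) (elems : List String) (offs : List Int)
    (lo hi : Nat) : Option (List String) :=
  if hi ≤ lo then some []
  else if hi = lo + 1 then
    let a : Int := (PySem.List.pyGet? rel (lo : Int)).getD 0 +
      (if (lo : Int) < (offs.length : Int) then (PySem.List.pyGet? offs (lo : Int)).getD 0 else 0)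
    if 0 ≤ a ∧ a < (elems.length : Int) then some [(PySem.List.pyGet? elems a).getD ""] else none
  else
    -- mid = (lo + hi) // 2, inlined
    match bitwo_solve rel elems offs lo ((lo + hi) / 2) with
    | none => none
    | some l =>
      match bitwo_solve rel elems offs ((lo + hi) / 2) hi with
      | none => none
      | some r => some (l ++ r)
termination_by hi - lo
decreasing_by all_goals omega

def build_index_tuple_with_offsets_py_alt (rel_indices : List Int) (elements : List String) (dimension : Int) (domain_offsets : List Int) : List String :=
  let n : Int := min dimension (rel_indices.length : Int)
  match bitwo_solve rel_indices elements domain_offsets 0 (if 0 < n then n.toNat else 0) with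
  | none => []
  | some l => l

-- ===== PRECONDITION & SPEC =====
def Spec_build_index_tuple_with_offsets_py (rel_indices : List Int) (elements : List String) (dimension : Int) (domain_offsets : List Int) (out : List String) : Prop := out = build_index_tuple_with_offsets_py_alt rel_indices elements dimension domain_offsets
instance (rel_indices : List Int) (elements : List String) (dimension : Int) (domain_offsets : List Int) (out : List String) : Decidable (Spec_build_index_tuple_with_offsets_py rel_indices elements dimension domain_offsets out) := by unfold Spec_build_index_tuple_with_offsets_py; infer_instance

-- ===== CLAIM (what is proved, stated in full; the proofs are below) =====
def Claim_equal_build_index_tuple_with_offsets_py : Prop := ∀ (rel_indices : List Int) (elements : List String) (dimension : Int) (domain_offsets : List Int), Dom_build_index_tuple_with_offsets_py rel_indices elements dimension domain_offsets → Spec_build_index_tuple_with_offsets_py rel_indices elements dimension domain_offsets (build_index_tuple_with_offsets_py rel_indices elements dimension domain_offsets)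

-- ===== LEMMAS AND PROOFS =====

-- the absolute index at position i, as both programs compute it
def bitwo_abs (rel offs : List Int) (i : Nat) : Int :=
  (PySem.List.pyGet? rel (i : Int)).getD 0 +
    (if (i : Int) < (offs.length : Int) then (PySem.List.pyGet? offs (i : Int)).getD 0 else 0)

def bitwo_chk (rel : List Int) (elems : List String) (offs : List Int) (i : Nat) : Bool :=
  decide (0 ≤ bitwo_abs rel offs i) && decide (bitwo_abs rel offs i < (elems.length : Int))

def bitwo_out (rel : List Int) (elems : List String) (offs : List Int) (i : Nat) : String :=
  (PySem.List.pyGet? elems (bitwo_abs rel offs i)).getD ""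

-- B's divide-and-conquer computes the staged check-then-map over its position range
lemma bitwo_solve_eq (rel : List Int) (elems : List String) (offs : List Int) :
    ∀ lo hi, bitwo_solve rel elems offs lo hi =
      (if (List.range' lo (hi - lo)).all (bitwo_chk rel elems offs) then
        some ((List.range' lo (hi - lo)).map (bitwo_out rel elems offs))
      else none) := by
  suffices H : ∀ k lo hi, hi - lo = k → bitwo_solve rel elems offs lo hi =
      (if (List.range' lo (hi - lo)).all (bitwo_chk rel elems offs) then
        some ((List.range' lo (hi - lo)).map (bitwo_out rel elems offs))
      else none) by
    intro lo hi; exact H (hi - lo) lo hi rfl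
  intro k
  induction k using Nat.strong_induction_on with
  | _ k ih =>
    intro lo hi hk
    rw [bitwo_solve]
    by_cases h0 : hi ≤ lo
    · have : hi - lo = 0 := by omega
      simp [h0, this]
    · rw [if_neg h0]
      by_cases h1 : hi = lo + 1
      · rw [if_pos h1]
        have : hi - lo = 1 := by omega
        rw [this]
        simp [bitwo_chk, bitwo_abs, bitwo_out]
      · rw [if_neg h1]
        have hm1 : lo < (lo + hi) / 2 := by omega
        have hm2 : (lo + hi) / 2 < hi := by omega
        rw [ih ((lo + hi) / 2 - lo) (by omega) lo ((lo + hi) / 2) rfl,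
            ih (hi - (lo + hi) / 2) (by omega) ((lo + hi) / 2) hi rfl]
        have hsplit : List.range' lo (hi - lo) =
            List.range' lo ((lo + hi) / 2 - lo) ++ List.range' ((lo + hi) / 2) (hi - (lo + hi) / 2) := by
          have h3 := @List.range'_append lo ((lo + hi) / 2 - lo) (hi - (lo + hi) / 2) 1
          rw [show lo + 1 * ((lo + hi) / 2 - lo) = (lo + hi) / 2 by omega,
              show ((lo + hi) / 2 - lo) + (hi - (lo + hi) / 2) = hi - lo by omega] at h3
          exact h3.symm
        rw [hsplit]
        by_cases c1 : (List.range' lo ((lo + hi) / 2 - lo)).all (bitwo_chk rel elems offs)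
        · by_cases c2 : (List.range' ((lo + hi) / 2) (hi - (lo + hi) / 2)).all (bitwo_chk rel elems offs)
          · simp [c1, c2]
          · simp [c1, c2]
        · simp [c1]

-- A's loop likewise equals the staged check-then-map over its index list
lemma bitwo_loopA_eq (rel : List Int) (elems : List String) (offs : List Int)
    (idxs : List Int) (acc : List String) :
    bitwo_loopA rel elems offs idxs acc =
      (let absl := idxs.map (fun i =>
          (PySem.List.pyGet? rel i).getD 0 +
            (if i < (offs.length : Int) then (PySem.List.pyGet? offs i).getD 0 else 0));
       if absl.all (fun a => decide (0 ≤ a) && decide (a < (elems.length : Int))) then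
         acc ++ absl.map (fun a => (PySem.List.pyGet? elems a).getD "")
       else []) := by
  induction idxs generalizing acc with
  | nil => simp [bitwo_loopA]
  | cons i rest ih =>
    simp only [bitwo_loopA, List.map_cons, List.all_cons]
    by_cases h : 0 ≤ (PySem.List.pyGet? rel i).getD 0 +
        (if i < (offs.length : Int) then (PySem.List.pyGet? offs i).getD 0 else 0) ∧
        (PySem.List.pyGet? rel i).getD 0 +
        (if i < (offs.length : Int) then (PySem.List.pyGet? offs i).getD 0 else 0) < (elems.length : Int)
    · rw [if_pos h, ih]
      simp [h.1, h.2]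
    · rw [if_neg h]
      rcases not_and_or.mp h with h1 | h1 <;> simp [h1]

lemma pyRange_nonpos (n : Int) (h : n ≤ 0) : PySem.List.pyRange 0 n 1 = [] := by
  rw [PySem.List.pyRange_one]
  have h0 : (n - 0).toNat = 0 := by omega
  rw [h0]; rfl

-- A's Int index list is B's Nat position range, cast
lemma pyRange_eq_range'_map (n : Int) (h : 0 < n) :
    PySem.List.pyRange 0 n 1 = (List.range' 0 n.toNat).map (fun k : Nat => (k : Int)) := by
  rw [PySem.List.pyRange_one]
  have : (n - 0).toNat = n.toNat := by omega
  rw [this, List.range_eq_range']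
  simp

-- ===== VERDICT =====
theorem build_index_tuple_with_offsets_py_spec : Claim_equal_build_index_tuple_with_offsets_py := by
  intro rel elems dim offs _hdom
  unfold Spec_build_index_tuple_with_offsets_py build_index_tuple_with_offsets_py
         build_index_tuple_with_offsets_py_alt
  simp only []
  set n : Int := min dim (rel.length : Int) with hn
  by_cases hpos : 0 < n
  · have hd : dim ≠ 0 := by omega
    rw [if_neg hd, bitwo_loopA_eq, if_pos hpos, bitwo_solve_eq,
        pyRange_eq_range'_map n hpos]
    simp only [Nat.sub_zero, List.map_map, List.all_map, Function.comp_def]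
    have hchk : (fun k : Nat =>
        (decide (0 ≤ (PySem.List.pyGet? rel (k : Int)).getD 0 +
            (if (k : Int) < (offs.length : Int) then (PySem.List.pyGet? offs (k : Int)).getD 0 else 0)) &&
         decide ((PySem.List.pyGet? rel (k : Int)).getD 0 +
            (if (k : Int) < (offs.length : Int) then (PySem.List.pyGet? offs (k : Int)).getD 0 else 0) < (elems.length : Int))))
        = bitwo_chk rel elems offs := by
      funext k; simp [bitwo_chk, bitwo_abs]
    have hout : (fun k : Nat =>
        (PySem.List.pyGet? elems ((PySem.List.pyGet? rel (k : Int)).getD 0 +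
            (if (k : Int) < (offs.length : Int) then (PySem.List.pyGet? offs (k : Int)).getD 0 else 0))).getD "")
        = bitwo_out rel elems offs := by
      funext k; simp [bitwo_out, bitwo_abs]
    rw [hchk, hout]
    by_cases hc : (List.range' 0 n.toNat).all (bitwo_chk rel elems offs)
    · simp [hc]
    · simp [hc]
  · rw [if_neg hpos]
    have hsolve : bitwo_solve rel elems offs 0 0 = some [] := by
      rw [bitwo_solve]; simp
    rw [hsolve]
    by_cases hd : dim = 0
    · rw [if_pos hd]
    · rw [if_neg hd, pyRange_nonpos n (by omega), bitwo_loopA]
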